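-- pv_equiv track=rewrite | github.com/aitakaitov/transformer_explainer | transformer_explainer/utils/utils.py | keep_top_k_abs
-- ===== SOURCE A (Python) =====
-- def keep_top_k_abs(values, k):
--     non_zero_count = 0
--     for val in values:
--         if val != 0:
--             non_zero_count += 1
--
--     if non_zero_count < k:
--         return values
--
--     a = non_zero_count - k
--     for i in range(non_zero_count - k):
--         min_val = float('inf')
--         min_idx = -1
--         for j in range(len(values)):
--             if values[j] != 0:
--                 if abs(values[j]) < min_val:
--                     min_val = abs(values[j])
--                     min_idx = j
--
--         values[min_idx] = 0
--     return values
-- ===== SOURCE B (Python) =====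
-- # B: sort the nonzero indices once by (abs value, index) and zero the first len(nz)-k
-- # of them in a single rebuild pass (A rescans the whole list once per zeroed entry).
-- # Equivalence is about the RETURN value only: A mutates `values` in place, B builds a new list.
-- def keep_top_k_abs(values, k):
--     nz = [i for i, v in enumerate(values) if v != 0]
--     if len(nz) < k:
--         return values
--     drop = set(sorted(nz, key=lambda i: (abs(values[i]), i))[:len(nz) - k])
--     return [0 if i in drop else v for i, v in enumerate(values)]
-- ===== Notes on version B (the rewrite author's own statement) =====
-- stated objective: faster
-- what changed: A repeatedly rescans the whole list to find and zero the smallest-|v| nonzero entry (one full scan per removal); B collects the nonzero indices once, sorts them by (|v|, index), zeroes the first n-k of them via a set, and rebuilds the list in one pass.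
import Mathlib
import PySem

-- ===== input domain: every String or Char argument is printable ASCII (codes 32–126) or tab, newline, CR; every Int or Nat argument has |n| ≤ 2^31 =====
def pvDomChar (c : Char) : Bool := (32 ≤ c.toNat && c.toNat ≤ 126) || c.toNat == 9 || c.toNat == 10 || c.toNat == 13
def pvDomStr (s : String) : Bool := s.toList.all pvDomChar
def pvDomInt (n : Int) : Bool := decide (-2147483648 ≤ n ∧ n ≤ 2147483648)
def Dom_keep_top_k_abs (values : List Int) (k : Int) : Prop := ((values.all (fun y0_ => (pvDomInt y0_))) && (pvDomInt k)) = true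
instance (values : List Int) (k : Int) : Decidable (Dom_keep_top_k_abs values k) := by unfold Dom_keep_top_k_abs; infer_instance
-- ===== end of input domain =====

-- B zeroes the smallest-|v| nonzero entries by sorting the nonzero indices once by (|v|, i)
-- instead of A's rescan-per-zeroed-entry; equivalence is about the RETURN value only
-- (the Python A mutates `values` in place, B builds a new list).

-- ===== PORT A =====
-- inner 'for j in range(len(values))' scan: running (min_val, min_idx), min_val = inf ported as none
def pvScanF (vs : List Int) (st : Option Int × Int) (j : Nat) : Option Int × Int :=
  match st with
  | (none, _) => (some |vs.getD j 0|, (j : Int))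
  | (some m, mi) => if |vs.getD j 0| < m then (some |vs.getD j 0|, (j : Int)) else (some m, mi)

def pvScanMin (vs : List Int) : Option Int × Int :=
  (List.range vs.length).foldl (fun st j => if vs.getD j 0 ≠ 0 then pvScanF vs st j else st) (none, -1)

-- 'values[i] = x' with Python indexing; out of range = IndexError (those inputs are outside Pre_)
def pvSetItem (vs : List Int) (i : Int) (x : Int) : List Int :=
  let j := if i < 0 then i + vs.length else i
  if 0 ≤ j ∧ j < (vs.length : Int) then vs.set j.toNat x else vs

def keep_top_k_abs (values : List Int) (k : Int) : List Int :=
  let nzc : Int := values.foldl (fun acc v => if v ≠ 0 then acc + 1 else acc) 0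
  if nzc < k then values
  else (PySem.List.pyRange 0 (nzc - k)).foldl (fun vs _ => pvSetItem vs (pvScanMin vs).2 0) values

-- ===== PORT B =====
-- nz = [i for i, v in enumerate(values) if v != 0]
def pvNZIdx (values : List Int) : List Nat :=
  (List.range values.length).filter (fun i => values.getD i 0 ≠ 0)

def keep_top_k_abs_alt (values : List Int) (k : Int) : List Int :=
  let nz := pvNZIdx values
  if (nz.length : Int) < k then values
  else
    let drop : PySem.Set Nat :=
      PySem.Set.ofList ((PySem.List.sorted2 nz (fun i => |values.getD i 0|) (fun i => i)).take
        ((nz.length : Int) - k).toNat)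
    (List.range values.length).map (fun i => if PySem.Set.contains drop i then 0 else values.getD i 0)

-- ===== PRECONDITION & SPEC =====
-- Pre_ excludes only (values = [], k < 0), where A's values[-1] = 0 raises IndexError.
def Pre_keep_top_k_abs (values : List Int) (k : Int) : Prop := values ≠ [] ∨ 0 ≤ k
instance (values : List Int) (k : Int) : Decidable (Pre_keep_top_k_abs values k) := by unfold Pre_keep_top_k_abs; infer_instance
def pvWitness_keep_top_k_abs : List Int × Int := ([2, -1, 3, 0, -1], 2)

def Spec_keep_top_k_abs (values : List Int) (k : Int) (out : List Int) : Prop := out = keep_top_k_abs_alt values k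
instance (values : List Int) (k : Int) (out : List Int) : Decidable (Spec_keep_top_k_abs values k out) := by unfold Spec_keep_top_k_abs; infer_instance

-- ===== CLAIM (what is proved, stated in full; the proofs are below) =====
def Claim_equal_keep_top_k_abs : Prop := ∀ (values : List Int) (k : Int), Dom_keep_top_k_abs values k → Pre_keep_top_k_abs values k → Spec_keep_top_k_abs values k (keep_top_k_abs values k)
-- ===== LEMMAS AND PROOFS =====

-- a loop that ignores its index is function iteration
theorem pv_foldl_ignore_iterate {α β : Type} (l : List α) (f : β → β) (init : β) :
    l.foldl (fun s _ => f s) init = f^[l.length] init := by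
  induction l generalizing init with
  | nil => rfl
  | cons x t ih => simp [List.foldl_cons, ih, Function.iterate_succ_apply]

theorem pv_map_range_getD (vs : List Int) :
    (List.range vs.length).map (fun i => vs.getD i 0) = vs := by
  apply List.ext_getElem
  · simp
  · intro i h1 h2
    simp only [List.getElem_map, List.getElem_range]
    exact List.getD_eq_getElem _ _ h2

theorem pv_count_eq (values : List Int) :
    values.foldl (fun acc v => if v ≠ 0 then acc + 1 else acc) 0 = ((pvNZIdx values).length : Int) := by
  rw [PySem.List.foldl_ite_add_one]
  have h1 : (pvNZIdx values).length = values.countP (fun v => decide (v ≠ 0)) := by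
    unfold pvNZIdx
    rw [← List.countP_eq_length_filter]
    conv_rhs => rw [← pv_map_range_getD values]
    rw [List.countP_map]
    rfl
  rw [h1]
  omega

theorem pvNZ_mem (vs : List Int) (i : Nat) :
    i ∈ pvNZIdx vs ↔ i < vs.length ∧ vs.getD i 0 ≠ 0 := by
  simp [pvNZIdx, List.mem_filter, List.mem_range]

theorem pvNZ_pairwise (vs : List Int) : (pvNZIdx vs).Pairwise (· < ·) :=
  List.Pairwise.filter _ List.pairwise_lt_range

theorem pvNZ_nodup (vs : List Int) : (pvNZIdx vs).Nodup :=
  (pvNZ_pairwise vs).imp (fun h => Nat.ne_of_lt h)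

-- single Nat key encoding the lexicographic pair (|vs[i]|, i) for indices i < vs.length
def pvEnc (vs : List Int) (i : Nat) : Nat := (vs.getD i 0).natAbs * vs.length + i

theorem pvEnc_lt_iff (vs : List Int) {i j : Nat} (hi : i < vs.length) (hj : j < vs.length) :
    pvEnc vs i < pvEnc vs j ↔
      (|vs.getD i 0| < |vs.getD j 0| ∨ (|vs.getD i 0| = |vs.getD j 0| ∧ i < j)) := by
  unfold pvEnc
  simp only [Int.abs_eq_natAbs, Nat.cast_lt, Nat.cast_inj]
  set a := (vs.getD i 0).natAbs
  set b := (vs.getD j 0).natAbs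
  set n := vs.length
  constructor
  · intro h
    rcases Nat.lt_trichotomy a b with h1 | h1 | h1
    · exact Or.inl h1
    · exact Or.inr ⟨h1, Nat.lt_of_add_lt_add_left (by rw [h1] at h; exact h)⟩
    · exfalso
      have hc : b * n + j < a * n + i := by
        calc b * n + j < b * n + n := Nat.add_lt_add_left hj _
        _ = (b + 1) * n := by ring
        _ ≤ a * n := Nat.mul_le_mul_right n h1
        _ ≤ a * n + i := Nat.le_add_right _ _
      omega
  · intro h
    rcases h with h1 | ⟨h1, h2⟩
    · calc a * n + i < a * n + n := Nat.add_lt_add_left hi _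
      _ = (a + 1) * n := by ring
      _ ≤ b * n := Nat.mul_le_mul_right n h1
      _ ≤ b * n + j := Nat.le_add_right _ _
    · rw [h1]
      exact Nat.add_lt_add_left h2 _

theorem pvEnc_inj (vs : List Int) {i j : Nat} (hi : i < vs.length) (hj : j < vs.length)
    (h : pvEnc vs i = pvEnc vs j) : i = j := by
  have h2 : (pvEnc vs i) % vs.length = (pvEnc vs j) % vs.length := by rw [h]
  simpa [pvEnc, Nat.mul_add_mod, Nat.mod_eq_of_lt hi, Nat.mod_eq_of_lt hj] using h2

theorem pv_insertBy_congr {α : Type} (b1 b2 : α → α → Bool) (P : α → Prop)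
    (hb : ∀ a b, P a → P b → b1 a b = b2 a b) :
    ∀ (ys : List α) (x : α), P x → (∀ y ∈ ys, P y) →
      PySem.List.insertBy b1 x ys = PySem.List.insertBy b2 x ys := by
  intro ys
  induction ys with
  | nil => intro x _ _; rfl
  | cons y t ih =>
    intro x hx hmem
    have e1 : PySem.List.insertBy b1 x (y :: t)
        = if b1 x y then x :: y :: t else y :: PySem.List.insertBy b1 x t := rfl
    have e2 : PySem.List.insertBy b2 x (y :: t)
        = if b2 x y then x :: y :: t else y :: PySem.List.insertBy b2 x t := rfl
    rw [e1, e2, hb x y hx (hmem y (by simp))]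
    by_cases hby : b2 x y
    · simp [hby]
    · simp only [hby, if_neg Bool.false_ne_true, List.cons.injEq, true_and]
      exact ih x hx (fun z hz => hmem z (by simp [hz]))

theorem pv_foldl_insertBy_congr {α : Type} (b1 b2 : α → α → Bool) (P : α → Prop)
    (hb : ∀ a b, P a → P b → b1 a b = b2 a b) :
    ∀ (xs acc : List α), (∀ y ∈ acc, P y) → (∀ y ∈ xs, P y) →
      xs.foldl (fun acc x => PySem.List.insertBy b1 x acc) acc
        = xs.foldl (fun acc x => PySem.List.insertBy b2 x acc) acc := by
  intro xs
  induction xs with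
  | nil => intro acc _ _; rfl
  | cons x t ih =>
    intro acc hacc hxs
    simp only [List.foldl_cons]
    rw [pv_insertBy_congr b1 b2 P hb acc x (hxs x (by simp)) hacc]
    refine ih _ ?_ (fun y hy => hxs y (by simp [hy]))
    intro y hy
    rcases (PySem.List.mem_insertBy b2 x y acc).mp hy with h | h
    · exact h ▸ hxs x (by simp)
    · exact hacc y h

-- B's tuple-key sort equals the single-key sort under pvEnc
theorem pv_sorted2_eq_sorted (vs : List Int) :
    PySem.List.sorted2 (pvNZIdx vs) (fun i => |vs.getD i 0|) (fun i => i)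
      = PySem.List.sorted (pvNZIdx vs) (pvEnc vs) := by
  rw [PySem.List.sorted_eq_foldl_insertBy]
  show (pvNZIdx vs).foldl (fun acc x => PySem.List.insertBy
      (fun a b => decide (|vs.getD a 0| < |vs.getD b 0|)
        || (!decide (|vs.getD b 0| < |vs.getD a 0|) && decide (a < b))) x acc) []
    = (pvNZIdx vs).foldl (fun acc x => PySem.List.insertBy
      (fun a b => decide (pvEnc vs a < pvEnc vs b)) x acc) []
  apply pv_foldl_insertBy_congr _ _ (fun i => i < vs.length)
  · intro a b ha hb'
    have hiff := pvEnc_lt_iff vs ha hb'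
    refine Bool.eq_iff_iff.mpr ?_
    simp only [Bool.or_eq_true, Bool.and_eq_true, Bool.not_eq_true', decide_eq_true_iff,
      decide_eq_false_iff_not]
    rw [hiff]
    have ht := lt_trichotomy (|vs.getD a 0|) (|vs.getD b 0|)
    constructor
    · rintro (h | ⟨h1, h2⟩)
      · exact Or.inl h
      · rcases ht with h3 | h3 | h3
        · exact Or.inl h3
        · exact Or.inr ⟨h3, h2⟩
        · exact absurd h3 h1
    · rintro (h | ⟨h1, h2⟩)
      · exact Or.inl h
      · exact Or.inr ⟨by rw [h1]; exact lt_irrefl _, h2⟩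
  · intro y hy; exact absurd hy (by simp)
  · intro y hy; exact ((pvNZ_mem vs y).mp hy).1

def pvS (vs : List Int) : List Nat := PySem.List.sorted (pvNZIdx vs) (pvEnc vs)

theorem pvS_nodup (vs : List Int) : (pvS vs).Nodup :=
  ((PySem.List.sorted_perm (pvNZIdx vs) (pvEnc vs) false).nodup_iff).mpr (pvNZ_nodup vs)

theorem pvS_mem (vs : List Int) (i : Nat) : i ∈ pvS vs ↔ i ∈ pvNZIdx vs :=
  PySem.List.mem_sorted _ _ _ _

theorem pvS_pairwise_lt (vs : List Int) :
    (pvS vs).Pairwise (fun a b => pvEnc vs a < pvEnc vs b) := by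
  have h1 := PySem.List.sorted_pairwise (pvNZIdx vs) (pvEnc vs)
  have h2 : (pvS vs).Pairwise (· ≠ ·) := pvS_nodup vs
  refine (h1.and h2).imp_of_mem ?_
  intro a b ha hb h
  have ha' : a < vs.length := ((pvNZ_mem vs a).mp ((pvS_mem vs a).mp ha)).1
  have hb' : b < vs.length := ((pvNZ_mem vs b).mp ((pvS_mem vs b).mp hb)).1
  exact lt_of_le_of_ne h.1 (fun he => h.2 (pvEnc_inj vs ha' hb' he))

theorem pv_scan_filter (vs : List Int) :
    pvScanMin vs = (pvNZIdx vs).foldl (pvScanF vs) (none, -1) := by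
  unfold pvScanMin pvNZIdx
  exact PySem.List.foldl_ite_eq_foldl_filter (fun j => vs.getD j 0 ≠ 0) (pvScanF vs) _ _

def pvAmin (vs : List Int) (i : Nat) (l : List Nat) : Nat :=
  l.foldl (fun b j => if |vs.getD j 0| < |vs.getD b 0| then j else b) i

theorem pv_scan_some (vs : List Int) :
    ∀ (l : List Nat) (i : Nat),
      l.foldl (pvScanF vs) (some |vs.getD i 0|, (i : Int))
        = (some |vs.getD (pvAmin vs i l) 0|, (pvAmin vs i l : Int)) := by
  intro l
  induction l with
  | nil => intro i; rfl
  | cons j t ih =>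
    intro i
    simp only [List.foldl_cons]
    have hred : pvScanF vs (some |vs.getD i 0|, (i : Int)) j
        = if |vs.getD j 0| < |vs.getD i 0| then (some |vs.getD j 0|, ((j : Nat) : Int))
          else (some |vs.getD i 0|, (i : Int)) := rfl
    have hstep : pvAmin vs i (j :: t)
        = pvAmin vs (if |vs.getD j 0| < |vs.getD i 0| then j else i) t := by
      unfold pvAmin; rw [List.foldl_cons]
    by_cases h : |vs.getD j 0| < |vs.getD i 0|
    · rw [hred, if_pos h, ih j, hstep, if_pos h]
    · rw [hred, if_neg h, ih i, hstep, if_neg h]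

theorem pv_scan_cons (vs : List Int) (i : Nat) (l : List Nat) (h : pvNZIdx vs = i :: l) :
    pvScanMin vs = (some |vs.getD (pvAmin vs i l) 0|, (pvAmin vs i l : Int)) := by
  rw [pv_scan_filter, h]
  simp only [List.foldl_cons]
  have h0 : pvScanF vs (none, -1) i = (some |vs.getD i 0|, (i : Int)) := rfl
  rw [h0, pv_scan_some]

theorem pv_scan_nil (vs : List Int) (h : pvNZIdx vs = []) : pvScanMin vs = (none, -1) := by
  rw [pv_scan_filter, h]; rfl

theorem pvAmin_spec (vs : List Int) :
    ∀ (l : List Nat) (i : Nat), (i :: l).Pairwise (· < ·) →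
      pvAmin vs i l ∈ i :: l ∧
        ∀ x ∈ i :: l, |vs.getD (pvAmin vs i l) 0| < |vs.getD x 0| ∨
          (|vs.getD (pvAmin vs i l) 0| = |vs.getD x 0| ∧ pvAmin vs i l ≤ x) := by
  intro l
  induction l with
  | nil =>
    intro i _
    refine ⟨by simp [pvAmin], ?_⟩
    intro x hx
    have hx' : x = i := by simpa using hx
    subst hx'
    exact Or.inr ⟨rfl, le_refl _⟩
  | cons j t ih =>
    intro i hp
    have h1 := List.pairwise_cons.mp hp
    have h2 := List.pairwise_cons.mp h1.2
    have hij : i < j := h1.1 j (by simp)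
    have hstep : pvAmin vs i (j :: t)
        = pvAmin vs (if |vs.getD j 0| < |vs.getD i 0| then j else i) t := by
      unfold pvAmin; rw [List.foldl_cons]
    by_cases hc : |vs.getD j 0| < |vs.getD i 0|
    · rw [hstep, if_pos hc]
      obtain ⟨hmem, hmin⟩ := ih j h1.2
      refine ⟨by rcases List.mem_cons.mp hmem with h | h <;> simp [h], ?_⟩
      intro x hx
      rcases List.mem_cons.mp hx with rfl | hx2
      · rcases hmin j (by simp) with h' | ⟨h'1, h'2⟩
        · exact Or.inl (lt_trans h' hc)
        · exact Or.inl (h'1 ▸ hc)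
      · exact hmin x hx2
    · rw [hstep, if_neg hc]
      have hle : |vs.getD i 0| ≤ |vs.getD j 0| := not_lt.mp hc
      have hp' : (i :: t).Pairwise (· < ·) :=
        List.pairwise_cons.mpr ⟨fun x hx => h1.1 x (by simp [hx]), h2.2⟩
      obtain ⟨hmem, hmin⟩ := ih i hp'
      refine ⟨?_, ?_⟩
      · rcases List.mem_cons.mp hmem with h | h <;> simp [h]
      · intro x hx
        rcases List.mem_cons.mp hx with rfl | hx2
        · exact hmin x (by simp)
        · rcases List.mem_cons.mp hx2 with rfl | hx3
          · rcases hmin i (by simp) with h' | ⟨h'1, h'2⟩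
            · exact Or.inl (lt_of_lt_of_le h' hle)
            · rcases lt_or_eq_of_le hle with h4 | h4
              · exact Or.inl (h'1 ▸ h4)
              · exact Or.inr ⟨h'1.trans h4, le_trans h'2 (le_of_lt hij)⟩
          · exact hmin x (by simp [hx3])

theorem pv_head_eq_amin (vs : List Int) (j : Nat) (t : List Nat) (hS : pvS vs = j :: t)
    (i : Nat) (l : List Nat) (hNZ : pvNZIdx vs = i :: l) : pvAmin vs i l = j := by
  have hjnz : j ∈ pvNZIdx vs := (pvS_mem vs j).mp (by rw [hS]; simp)
  have hj' : j < vs.length := ((pvNZ_mem vs j).mp hjnz).1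
  obtain ⟨hmem, hmin⟩ := pvAmin_spec vs l i (hNZ ▸ pvNZ_pairwise vs)
  have hanz : pvAmin vs i l ∈ pvNZIdx vs := by rw [hNZ]; exact hmem
  have ha' : pvAmin vs i l < vs.length := ((pvNZ_mem vs (pvAmin vs i l)).mp hanz).1
  have hSu : PySem.List.sorted (pvNZIdx vs) (pvEnc vs) = j :: t := hS
  have h1 : pvEnc vs j ≤ pvEnc vs (pvAmin vs i l) :=
    PySem.List.key_head_sorted_le _ _ hSu _ hanz
  have h2 := hmin j (by rw [← hNZ]; exact hjnz)
  by_contra hne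
  have hlt : pvEnc vs (pvAmin vs i l) < pvEnc vs j := by
    rw [pvEnc_lt_iff vs ha' hj']
    rcases h2 with h | ⟨hh1, hh2⟩
    · exact Or.inl h
    · exact Or.inr ⟨hh1, lt_of_le_of_ne hh2 hne⟩
  omega

theorem pv_getD_set (vs : List Int) (j i : Nat) (hi : i < vs.length) :
    (vs.set j 0).getD i 0 = if j = i then 0 else vs.getD i 0 := by
  have hset : i < (vs.set j 0).length := by simpa using hi
  rw [List.getD_eq_getElem _ _ hset, List.getD_eq_getElem _ _ hi, List.getElem_set]

theorem pvNZ_set (vs : List Int) (j : Nat) :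
    pvNZIdx (vs.set j 0) = (pvNZIdx vs).erase j := by
  rw [(pvNZ_nodup vs).erase_eq_filter j]
  unfold pvNZIdx
  rw [List.filter_filter]
  simp only [List.length_set]
  apply List.filter_congr
  intro x hx
  have hx' : x < vs.length := List.mem_range.mp hx
  rw [pv_getD_set vs j x hx']
  by_cases h : j = x
  · subst h; simp
  · simp [h, Ne.symm h]

theorem pv_set_zero_eq (vs : List Int) (p : Nat) (hz : vs.getD p 0 = 0) : vs.set p 0 = vs := by
  apply List.ext_getElem
  · simp
  · intro i h1 h2
    rw [List.getElem_set]
    by_cases h : p = i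
    · subst h
      rw [List.getD_eq_getElem _ _ h2] at hz
      simp [hz]
    · simp [h]

theorem pvNZ_nil_getD (vs : List Int) (h : pvNZIdx vs = []) (i : Nat) (hi : i < vs.length) :
    vs.getD i 0 = 0 := by
  by_contra hne
  have : i ∈ pvNZIdx vs := (pvNZ_mem vs i).mpr ⟨hi, hne⟩
  rw [h] at this; simp at this

def pvStep (w : List Int) : List Int := pvSetItem w (pvScanMin w).2 0

theorem pvS_set_head (vs : List Int) (j : Nat) (t : List Nat) (hS : pvS vs = j :: t) :
    pvS (vs.set j 0) = t := by
  have hsp : (pvS vs).Perm (pvNZIdx vs) := PySem.List.sorted_perm _ _ _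
  have hperm : (j :: t).Perm (pvNZIdx vs) := hS ▸ hsp
  have hnd : (j :: t).Nodup := hS ▸ pvS_nodup vs
  have hjt : j ∉ t := (List.nodup_cons.mp hnd).1
  have hpt : t.Perm (pvNZIdx (vs.set j 0)) := by
    rw [pvNZ_set vs j]
    have h0 := hperm.erase j
    simpa [List.erase_cons_head] using h0
  have hpw : (j :: t).Pairwise (fun a b => pvEnc vs a < pvEnc vs b) := hS ▸ pvS_pairwise_lt vs
  have henc : ∀ a ∈ t, pvEnc (vs.set j 0) a = pvEnc vs a := by
    intro a ha
    have hanz : a ∈ pvNZIdx vs := hperm.mem_iff.mp (by simp [ha])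
    have ha' : a < vs.length := ((pvNZ_mem vs a).mp hanz).1
    have hne : j ≠ a := fun he => hjt (he ▸ ha)
    unfold pvEnc
    rw [List.length_set, pv_getD_set vs j a ha', if_neg hne]
  have hpwt : t.Pairwise (fun a b => pvEnc (vs.set j 0) a < pvEnc (vs.set j 0) b) := by
    refine (List.pairwise_cons.mp hpw).2.imp_of_mem ?_
    intro a b ha hb h
    rw [henc a ha, henc b hb]
    exact h
  exact PySem.List.sorted_eq_of_perm_of_pairwise_lt _ _ _ hpt hpwt

theorem pvStep_eq_set (vs : List Int) (j : Nat) (t : List Nat) (hS : pvS vs = j :: t) :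
    pvStep vs = vs.set j 0 := by
  have hnz_ne : pvNZIdx vs ≠ [] := by
    intro h0
    have h1 : pvS vs = [] := (PySem.List.sorted_eq_nil_iff _ _ _).mpr h0
    rw [hS] at h1
    simp at h1
  obtain ⟨i, l, hNZ⟩ : ∃ i l, pvNZIdx vs = i :: l := by
    cases hnz : pvNZIdx vs with
    | nil => exact absurd hnz hnz_ne
    | cons a b => exact ⟨a, b, rfl⟩
  have hj := pv_head_eq_amin vs j t hS i l hNZ
  have hj' : j < vs.length := ((pvNZ_mem vs j).mp ((pvS_mem vs j).mp (by rw [hS]; simp))).1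
  unfold pvStep
  rw [pv_scan_cons vs i l hNZ]
  show pvSetItem vs ((pvAmin vs i l : Nat) : Int) 0 = vs.set j 0
  rw [hj]
  unfold pvSetItem
  have hnn : ¬ ((j : Int) < 0) := not_lt.mpr (Int.natCast_nonneg j)
  have hcond : (0 : Int) ≤ (j : Int) ∧ (j : Int) < (vs.length : Int) :=
    ⟨Int.natCast_nonneg j, by exact_mod_cast hj'⟩
  simp only [hnn, if_false, if_pos hcond, Int.toNat_natCast]

theorem pv_rounds : ∀ (m : Nat) (vs : List Int), (vs ≠ [] ∨ m ≤ (pvS vs).length) →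
    pvStep^[m] vs = ((pvS vs).take m).foldl (fun w j => w.set j 0) vs := by
  intro m
  induction m with
  | zero => intro vs _; simp
  | succ m ih =>
    intro vs hyp
    rw [Function.iterate_succ_apply]
    cases hScase : pvS vs with
    | nil =>
      have hnz : pvNZIdx vs = [] := (PySem.List.sorted_eq_nil_iff _ _ _).mp hScase
      have hvs_ne : vs ≠ [] := by
        rcases hyp with h | h
        · exact h
        · rw [hScase] at h; simp at h
      have hlen : 0 < vs.length := List.length_pos_of_ne_nil hvs_ne
      have hstep : pvStep vs = vs := by
        unfold pvStep
        rw [pv_scan_nil vs hnz]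
        show pvSetItem vs (-1) 0 = vs
        unfold pvSetItem
        have hc1 : (-1 : Int) < 0 := by norm_num
        have hcond : (0 : Int) ≤ -1 + (vs.length : Int) ∧ -1 + (vs.length : Int) < (vs.length : Int) := by
          omega
        simp only [hc1, if_true, if_pos hcond]
        have htn : ((-1 : Int) + (vs.length : Int)).toNat = vs.length - 1 := by omega
        rw [htn]
        exact pv_set_zero_eq vs _ (pvNZ_nil_getD vs hnz _ (by omega))
      rw [hstep, ih vs (Or.inl hvs_ne), hScase]
      simp
    | cons j t =>
      rw [pvStep_eq_set vs j t hScase]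
      have hS' := pvS_set_head vs j t hScase
      have hyp' : vs.set j 0 ≠ [] ∨ m ≤ (pvS (vs.set j 0)).length := by
        rcases hyp with h | h
        · left
          intro h0
          have hl := congrArg List.length h0
          simp only [List.length_set, List.length_nil] at hl
          exact h (List.length_eq_zero_iff.mp hl)
        · right
          rw [hS']
          rw [hScase] at h
          simp at h
          omega
      rw [ih (vs.set j 0) hyp', hS', List.take_succ_cons, List.foldl_cons]

theorem pv_zero_length : ∀ (l : List Nat) (vs : List Int),
    (l.foldl (fun w j => w.set j 0) vs).length = vs.length := by
  intro l
  induction l with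
  | nil => intro vs; rfl
  | cons j t ih => intro vs; simpa [List.foldl_cons, List.length_set] using ih (vs.set j 0)

theorem pv_zero_getD : ∀ (l : List Nat) (vs : List Int) (i : Nat), i < vs.length →
    (l.foldl (fun w j => w.set j 0) vs).getD i 0 = if i ∈ l then 0 else vs.getD i 0 := by
  intro l
  induction l with
  | nil => intro vs i hi; simp
  | cons j t ih =>
    intro vs i hi
    simp only [List.foldl_cons]
    rw [ih (vs.set j 0) i (by simpa using hi), pv_getD_set vs j i hi]
    by_cases h1 : i ∈ t <;> by_cases h2 : j = i <;>
      simp [h1, h2, List.mem_cons, eq_comm]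

-- ===== VERDICT (by name: the statement is the Claim_ definition above) =====
theorem keep_top_k_abs_spec : Claim_equal_keep_top_k_abs := by
  intro values k hdom hpre
  simp only [Spec_keep_top_k_abs, keep_top_k_abs, keep_top_k_abs_alt]
  rw [pv_count_eq values]
  by_cases hk : ((pvNZIdx values).length : Int) < k
  · simp [hk]
  · rw [if_neg hk, if_neg hk]
    have hkk : k ≤ ((pvNZIdx values).length : Int) := not_lt.mp hk
    set M := ((((pvNZIdx values).length : Int)) - k).toNat with hM
    have hMcast : ((pvNZIdx values).length : Int) - k = (M : Int) := by omega
    rw [hMcast, PySem.List.pyRange_zero_natCast]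
    rw [pv_foldl_ignore_iterate]
    simp only [List.length_map, List.length_range]
    have hfs : (fun (vs : List Int) => pvSetItem vs (pvScanMin vs).2 0) = pvStep := rfl
    rw [hfs]
    rw [pv_rounds M values ?hyp]
    case hyp =>
      rcases hpre with h | h
      · exact Or.inl h
      · right
        have hls : (pvS values).length = (pvNZIdx values).length :=
          PySem.List.length_sorted _ _ _
        omega
    rw [pv_sorted2_eq_sorted values]
    apply List.ext_getElem
    · simp [pv_zero_length, List.length_map, List.length_range]
    · intro i h1 h2
      have hi : i < values.length := by
        have hl := pv_zero_length ((pvS values).take M) values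
        omega
      rw [← List.getD_eq_getElem _ 0 h1, pv_zero_getD _ _ _ hi]
      simp only [List.getElem_map, List.getElem_range]
      simp only [show PySem.List.sorted (pvNZIdx values) (pvEnc values) = pvS values from rfl]
      by_cases hmem : i ∈ (pvS values).take M
      · simp [hmem, PySem.Set.contains, PySem.Set.mem_ofList]
      · simp [hmem, PySem.Set.contains, PySem.Set.mem_ofList]
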